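-- pv_equiv track=rewrite | github.com/mapledyne/legolabels | generate.py | addFirstQuote
-- ===== SOURCE A (Python) =====
-- def addFirstQuote(string):
--     retval = ""
--     first = True
--     for ch in string:
--         if (first):
--             if (ch == "\t" or ch == " " or ch == ","):
--                 retval += ch
--             else:
--                 retval += '"' + ch
--                 first = False
--         else:
--             retval += ch
--     return retval
-- ===== SOURCE B (Python) =====
-- def addFirstQuote(string):
--     for i, ch in enumerate(string):
--         if ch not in " \t,":
--             return string[:i] + '"' + string[i:]
--     return string
-- ===== Notes on version B (the rewrite author's own statement) =====
-- stated objective: faster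
-- what changed: Replaces the per-character accumulator loop with a locate-then-slice structure: find the first character that is not a space, tab or comma, then return prefix + quote + rest (or the string unchanged if none), avoiding A's repeated string concatenation.
import Mathlib
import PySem

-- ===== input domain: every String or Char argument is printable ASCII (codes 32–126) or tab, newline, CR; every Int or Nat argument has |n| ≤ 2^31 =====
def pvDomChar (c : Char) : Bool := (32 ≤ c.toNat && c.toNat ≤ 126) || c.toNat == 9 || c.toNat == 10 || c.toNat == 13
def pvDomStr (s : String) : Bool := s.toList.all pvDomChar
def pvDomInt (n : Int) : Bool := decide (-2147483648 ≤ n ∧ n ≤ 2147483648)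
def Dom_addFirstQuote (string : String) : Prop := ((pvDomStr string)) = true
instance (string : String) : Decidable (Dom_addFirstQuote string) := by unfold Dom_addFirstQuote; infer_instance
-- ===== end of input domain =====

-- B replaces A's per-character accumulator loop with locate-then-slice: keep the leading
-- separators, insert '"' before the first non-separator, keep the rest unchanged (simpler).


-- ===== PORT A =====
-- A folds over the characters carrying (retval, first): while first, separators are
-- appended as-is; the first non-separator is appended as '"' + ch and first goes false.
def addFirstQuoteStep (st : List Char × Bool) (ch : Char) : List Char × Bool :=
  if st.2 then
    if ch = '\t' ∨ ch = ' ' ∨ ch = ',' then (st.1 ++ [ch], st.2)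
    else (st.1 ++ ['"', ch], false)
  else (st.1 ++ [ch], st.2)

def addFirstQuote (string : String) : String :=
  String.ofList (string.toList.foldl addFirstQuoteStep ([], true)).1

-- ===== PORT B =====
-- B scans for the first character not in " \t,"; if found at i it returns
-- string[:i] + '"' + string[i:], else the string unchanged.
def addFirstQuoteLocate : List Char → List Char
  | [] => []
  | c :: cs =>
    if c = ' ' ∨ c = '\t' ∨ c = ',' then c :: addFirstQuoteLocate cs
    else '"' :: c :: cs

def addFirstQuote_alt (string : String) : String :=
  String.ofList (addFirstQuoteLocate string.toList)

-- ===== PRECONDITION & SPEC =====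
def Spec_addFirstQuote (string : String) (out : String) : Prop := out = addFirstQuote_alt string
instance (string : String) (out : String) : Decidable (Spec_addFirstQuote string out) := by unfold Spec_addFirstQuote; infer_instance

-- ===== CLAIM (what is proved, stated in full; the proofs are below) =====
def Claim_equal_addFirstQuote : Prop := ∀ (string : String), Dom_addFirstQuote string → Spec_addFirstQuote string (addFirstQuote string)

-- ===== LEMMAS AND PROOFS =====
theorem addFirstQuote_foldl_false (l acc : List Char) :
    (l.foldl addFirstQuoteStep (acc, false)).1 = acc ++ l := by
  induction l generalizing acc with
  | nil => simp
  | cons c cs ih => simp [addFirstQuoteStep, ih]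

theorem addFirstQuote_foldl_true (l acc : List Char) :
    (l.foldl addFirstQuoteStep (acc, true)).1 = acc ++ addFirstQuoteLocate l := by
  induction l generalizing acc with
  | nil => simp [addFirstQuoteLocate]
  | cons c cs ih =>
    by_cases h : c = '\t' ∨ c = ' ' ∨ c = ','
    · simp only [List.foldl_cons, addFirstQuoteStep, if_pos h, if_true]
      rw [ih]
      simp [addFirstQuoteLocate]
      rcases h with h | h | h <;> simp [h]
    · simp only [List.foldl_cons, addFirstQuoteStep, if_neg h, if_true]
      rw [addFirstQuote_foldl_false]
      push Not at h
      simp [addFirstQuoteLocate, h.1, h.2.1, h.2.2]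

-- ===== VERDICT (by name: the statement is the Claim_ definition above) =====
theorem addFirstQuote_spec : Claim_equal_addFirstQuote := by
  intro s _
  unfold Spec_addFirstQuote addFirstQuote addFirstQuote_alt
  rw [addFirstQuote_foldl_true]
  simp
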